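-- pv_equiv track=rewrite | github.com/stxinsite/wepy | wepy/reporter/dashboard.py | leaf_regions_to_all_regions
-- ===== SOURCE A (Python) =====
-- def leaf_regions_to_all_regions(region_ids):
--     regions = set()
--     for region_id in region_ids:
--         for i in range(len(region_id)):
--             regions.add(region_id[0:i+1])
--
--     regions = list(regions)
--     regions.sort()
--
--     return regions
-- ===== SOURCE B (Python) =====
-- def leaf_regions_to_all_regions(region_ids):
--     # Sort the leaf ids once, then emit each id's prefixes that are not
--     # already prefixes of the previous (sorted) id: sorted order makes the
--     # longest-common-prefix skip an exact deduplication, so the output is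
--     # the sorted, duplicate-free list of all non-empty prefixes.
--     out = []
--     prev = ()
--     for rid in sorted(region_ids):
--         k = 0
--         while k < len(rid) and k < len(prev) and rid[k] == prev[k]:
--             k += 1
--         for i in range(k, len(rid)):
--             out.append(rid[0:i + 1])
--         prev = rid
--     return out
-- ===== Notes on version B (the rewrite author's own statement) =====
-- stated objective: faster
-- what changed: Replaces the hash-set of all prefixes plus a full sort of every prefix by sorting only the leaf ids once and then emitting, in one pass, each id's prefixes past the longest common prefix with the previous sorted id (sortedness makes the LCP skip an exact deduplication and yields the output already sorted).
import Mathlib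
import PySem

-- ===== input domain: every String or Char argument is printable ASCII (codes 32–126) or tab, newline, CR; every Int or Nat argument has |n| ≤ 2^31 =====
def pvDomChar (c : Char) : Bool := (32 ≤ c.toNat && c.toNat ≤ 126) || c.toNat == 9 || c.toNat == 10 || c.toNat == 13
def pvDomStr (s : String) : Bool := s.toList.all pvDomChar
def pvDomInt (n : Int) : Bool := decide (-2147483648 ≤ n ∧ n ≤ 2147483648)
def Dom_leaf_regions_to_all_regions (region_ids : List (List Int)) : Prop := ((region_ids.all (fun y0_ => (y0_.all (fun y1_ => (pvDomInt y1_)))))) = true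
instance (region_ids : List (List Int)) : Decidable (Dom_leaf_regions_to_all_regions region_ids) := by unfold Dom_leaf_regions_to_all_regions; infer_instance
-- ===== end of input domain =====

-- B sorts the leaf ids once and emits each id's prefixes past the longest common
-- prefix with the previous sorted id, instead of A's set-of-all-prefixes + sort (faster).


-- ===== PORT A =====
def leaf_regions_to_all_regions (region_ids : List (List Int)) : List (List Int) :=
  let regions : PySem.Set (List Int) :=
    region_ids.foldl (fun regions region_id =>
      (PySem.List.pyRange 0 (region_id.length : Int) 1).foldl
        (fun regions i => PySem.Set.add regions (PySem.List.slice region_id (some 0) (some (i + 1))))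
        regions)
      PySem.Set.empty
  PySem.List.sorted regions (fun x => x) false

-- ===== PORT B =====
-- the while loop computing the longest-common-prefix length k
def pyLcp : List Int → List Int → Nat
  | a :: as, b :: bs => if a = b then pyLcp as bs + 1 else 0
  | _, _ => 0

def leaf_regions_to_all_regions_alt (region_ids : List (List Int)) : List (List Int) :=
  ((PySem.List.sorted region_ids (fun x => x) false).foldl
    (fun (st : List (List Int) × List Int) rid =>
      let k := pyLcp rid st.2
      ((PySem.List.pyRange (k : Int) (rid.length : Int) 1).foldl
        (fun out i => out ++ [PySem.List.slice rid (some 0) (some (i + 1))]) st.1,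
       rid))
    ([], [])).1

-- ===== PRECONDITION & SPEC =====
def Spec_leaf_regions_to_all_regions (region_ids : List (List Int)) (out : List (List Int)) : Prop := out = leaf_regions_to_all_regions_alt region_ids
instance (region_ids : List (List Int)) (out : List (List Int)) : Decidable (Spec_leaf_regions_to_all_regions region_ids out) := by unfold Spec_leaf_regions_to_all_regions; infer_instance

-- ===== CLAIM (what is proved, stated in full; the proofs are below) =====
def Claim_equal_leaf_regions_to_all_regions : Prop := ∀ (region_ids : List (List Int)), Dom_leaf_regions_to_all_regions region_ids → Spec_leaf_regions_to_all_regions region_ids (leaf_regions_to_all_regions region_ids)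

-- ===== LEMMAS AND PROOFS =====

theorem nil_le_list (x : List Int) : ([] : List Int) ≤ x := by
  cases x with
  | nil => exact le_refl _
  | cons y ys => exact le_of_lt (List.Lex.nil)
theorem cons_le_cons_iff {x y : Int} {a c : List Int} (h : (x :: a) ≤ (y :: c)) :
    x < y ∨ (x = y ∧ a ≤ c) := by
  rcases lt_or_eq_of_le h with h' | h'
  · have h'' : List.Lex (· < ·) (x :: a) (y :: c) := h'
    cases h'' with
    | cons h3 => exact Or.inr ⟨rfl, le_of_lt h3⟩
    | rel h3 => exact Or.inl h3
  · injection h' with h1 h2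
    exact Or.inr ⟨h1, le_of_eq h2⟩
theorem prefix_middle {a b c p : List Int} (hab : a ≤ b) (hbc : b ≤ c)
    (hpa : p <+: a) (hpc : p <+: c) : p <+: b := by
  induction p generalizing a b c with
  | nil => simp
  | cons x p' ih =>
    cases a with
    | nil => simp at hpa
    | cons xa a' =>
      rcases List.cons_prefix_cons.mp hpa with ⟨h1, hpa'⟩
      cases c with
      | nil => simp at hpc
      | cons xc c' =>
        rcases List.cons_prefix_cons.mp hpc with ⟨h2, hpc'⟩
        cases b with
        | nil =>
          have : (xa :: a' : List Int) = [] := le_antisymm hab (nil_le_list _)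
          simp at this
        | cons xb b' =>
          rcases cons_le_cons_iff hab with h3 | ⟨h3, hab'⟩
          · rcases cons_le_cons_iff hbc with h4 | ⟨h4, hbc'⟩
            · omega
            · omega
          · subst h3
            rcases cons_le_cons_iff hbc with h4 | ⟨h4, hbc'⟩
            · omega
            · exact List.cons_prefix_cons.mpr ⟨h1, ih hab' hbc' hpa' hpc'⟩
theorem lcp_ge {p a b : List Int} (hpa : p <+: a) (hlen : p.length ≤ pyLcp a b) : p <+: b := by
  induction p generalizing a b with
  | nil => simp
  | cons x p' ih =>
    cases a with
    | nil => simp at hpa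
    | cons xa a' =>
      rcases List.cons_prefix_cons.mp hpa with ⟨rfl, hpa'⟩
      cases b with
      | nil => simp [pyLcp] at hlen
      | cons xb b' =>
        by_cases hx : x = xb
        · subst hx
          simp [pyLcp] at hlen
          exact List.cons_prefix_cons.mpr ⟨rfl, ih hpa' (by omega)⟩
        · simp [pyLcp, hx] at hlen
theorem lcp_le {p a b : List Int} (hpa : p <+: a) (hpb : p <+: b) : p.length ≤ pyLcp a b := by
  induction p generalizing a b with
  | nil => simp
  | cons x p' ih =>
    cases a with
    | nil => simp at hpa
    | cons xa a' =>
      cases b with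
      | nil => simp at hpb
      | cons xb b' =>
        rcases List.cons_prefix_cons.mp hpa with ⟨rfl, hpa'⟩
        rcases List.cons_prefix_cons.mp hpb with ⟨h2, hpb'⟩
        simp only [pyLcp, if_pos h2, List.length_cons]
        have := ih hpa' hpb'
        omega
theorem cross_lt {p q a c : List Int} (hpa : p <+: a) (hac : a ≤ c) (hqc : q <+: c)
    (hqa : ¬ q <+: a) : p < q := by
  induction p generalizing q a c with
  | nil =>
    cases q with
    | nil => exact absurd (List.nil_prefix) hqa
    | cons y q' => exact List.Lex.nil
  | cons x p' ih =>
    cases a with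
    | nil => simp at hpa
    | cons xa a' =>
      rcases List.cons_prefix_cons.mp hpa with ⟨rfl, hpa'⟩
      cases q with
      | nil => exact absurd (List.nil_prefix) hqa
      | cons y q' =>
        cases c with
        | nil => simp at hqc
        | cons xc c' =>
          rcases List.cons_prefix_cons.mp hqc with ⟨rfl, hqc'⟩
          rcases cons_le_cons_iff hac with h3 | ⟨h3, hac'⟩
          · exact List.Lex.rel h3
          · subst h3
            have hqa' : ¬ q' <+: a' := fun h => hqa (List.cons_prefix_cons.mpr ⟨rfl, h⟩)
            exact List.Lex.cons (ih hpa' hac' hqc' hqa')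
def prefsOf (rid : List Int) : List (List Int) :=
  (List.range rid.length).map (fun n => rid.take (n + 1))
def emitP (rid : List Int) (k : Nat) : List (List Int) :=
  (List.range (rid.length - k)).map (fun j => rid.take (k + j + 1))
theorem mem_prefsOf {p rid : List Int} : p ∈ prefsOf rid ↔ p ≠ [] ∧ p <+: rid := by
  simp only [prefsOf, List.mem_map, List.mem_range]
  constructor
  · rintro ⟨n, hn, rfl⟩
    constructor
    · have : (rid.take (n+1)).length = n + 1 := by
        rw [List.length_take]; omega
      intro h; rw [h] at this; simp at this
    · exact List.take_prefix _ _
  · rintro ⟨hne, hpre⟩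
    refine ⟨p.length - 1, ?_, ?_⟩
    · have := hpre.length_le
      have : p.length ≠ 0 := by simpa using hne
      omega
    · have hl : p.length - 1 + 1 = p.length := by
        have : p.length ≠ 0 := by simpa using hne
        omega
      rw [hl]; exact (List.prefix_iff_eq_take.mp hpre).symm
theorem mem_emitP {p rid : List Int} {k : Nat} :
    p ∈ emitP rid k ↔ p <+: rid ∧ k < p.length := by
  simp only [emitP, List.mem_map, List.mem_range]
  constructor
  · rintro ⟨j, hj, rfl⟩
    refine ⟨List.take_prefix _ _, ?_⟩
    rw [List.length_take]; omega
  · rintro ⟨hpre, hk⟩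
    have hle := hpre.length_le
    refine ⟨p.length - k - 1, by omega, ?_⟩
    have : k + (p.length - k - 1) + 1 = p.length := by omega
    rw [this]; exact (List.prefix_iff_eq_take.mp hpre).symm
theorem slice_take (rid : List Int) (n : Nat) :
    PySem.List.slice rid (some 0) (some ((n : Int) + 1)) = rid.take (n + 1) := by
  have : ((n : Int) + 1) = ((n + 1 : Nat) : Int) := by push_cast; ring
  rw [this]
  have h := PySem.List.slice_natCast (xs := rid) (a := 0) (b := n+1)
  simpa using h
theorem map_slice_range (rid : List Int) (k : Nat) :
    (PySem.List.pyRange (k : Int) (rid.length : Int) 1).map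
      (fun i => PySem.List.slice rid (some 0) (some (i + 1))) = emitP rid k := by
  rw [PySem.List.pyRange_one, List.map_map, emitP]
  have hn : ((rid.length : Int) - (k : Int)).toNat = rid.length - k := Int.toNat_sub _ _
  rw [hn]
  apply List.map_congr_left
  intro j hj
  simp only [Function.comp]
  have : (k : Int) + (j : Int) + 1 = ((k + j : Nat) : Int) + 1 := by push_cast; ring
  rw [this, slice_take]
theorem foldl_append_singleton {α β : Type} (l : List α) (f : α → β) (acc : List β) :
    l.foldl (fun out i => out ++ [f i]) acc = acc ++ l.map f := by
  induction l generalizing acc with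
  | nil => simp
  | cons x xs ih => simp [ih]
def allPref (ids : List (List Int)) : List (List Int) := ids.flatMap prefsOf
theorem prefsOf_eq_emitP (rid : List Int) : prefsOf rid = emitP rid 0 := by
  simp [prefsOf, emitP]
theorem fold_A (ids : List (List Int)) :
    (ids.foldl (fun regions region_id =>
      (PySem.List.pyRange 0 (region_id.length : Int) 1).foldl
        (fun regions i => PySem.Set.add regions (PySem.List.slice region_id (some 0) (some (i + 1))))
        regions)
      PySem.Set.empty) = PySem.Set.ofList (allPref ids) := by
  have inner : ∀ (rid : List Int) (s : PySem.Set (List Int)),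
      (PySem.List.pyRange 0 (rid.length : Int) 1).foldl
        (fun regions i => PySem.Set.add regions (PySem.List.slice rid (some 0) (some (i + 1)))) s
      = PySem.Set.update s (prefsOf rid) := by
    intro rid s
    rw [PySem.Set.update, ← List.foldl_map, prefsOf_eq_emitP, ← map_slice_range rid 0]
    rfl
  have gen : ∀ (l : List (List Int)) (s : PySem.Set (List Int)),
      (l.foldl (fun regions region_id =>
        (PySem.List.pyRange 0 (region_id.length : Int) 1).foldl
          (fun regions i => PySem.Set.add regions (PySem.List.slice region_id (some 0) (some (i + 1))))
          regions) s) = PySem.Set.update s (allPref l) := by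
    intro l
    induction l with
    | nil => intro s; simp [allPref, PySem.Set.update]
    | cons rid rest ih =>
      intro s
      rw [List.foldl_cons, inner, ih]
      simp [allPref, PySem.Set.update, List.foldl_append]
  rw [gen]
  rfl
def goScan (prev : List Int) : List (List Int) → List (List Int)
  | [] => []
  | rid :: rest => emitP rid (pyLcp rid prev) ++ goScan rid rest
theorem fold_B (l : List (List Int)) (acc : List (List Int)) (prev : List Int) :
    (l.foldl
      (fun (st : List (List Int) × List Int) rid =>
        let k := pyLcp rid st.2
        ((PySem.List.pyRange (k : Int) (rid.length : Int) 1).foldl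
          (fun out i => out ++ [PySem.List.slice rid (some 0) (some (i + 1))]) st.1,
         rid))
      (acc, prev)).1 = acc ++ goScan prev l := by
  induction l generalizing acc prev with
  | nil => simp [goScan]
  | cons rid rest ih =>
    simp only [List.foldl_cons, goScan]
    rw [foldl_append_singleton, map_slice_range]
    rw [ih]
    simp [List.append_assoc]
theorem prefix_lt {p q : List Int} (hp : p <+: q) (hne : p ≠ q) : p < q := by
  induction p generalizing q with
  | nil =>
    cases q with
    | nil => exact absurd rfl hne
    | cons y ys => exact List.Lex.nil
  | cons x p' ih =>
    cases q with
    | nil => simp at hp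
    | cons y q' =>
      rcases List.cons_prefix_cons.mp hp with ⟨rfl, hp'⟩
      exact List.Lex.cons (ih hp' (fun h => hne (by rw [h])))
theorem pairwise_emitP (rid : List Int) (k : Nat) : (emitP rid k).Pairwise (· < ·) := by
  rw [List.pairwise_iff_getElem]
  intro i j hi hj hij
  simp only [emitP, List.length_map, List.length_range] at hi hj
  simp only [emitP, List.getElem_map, List.getElem_range]
  have hpre : rid.take (k + i + 1) <+: rid.take (k + j + 1) := by gcongr
  apply prefix_lt hpre
  intro h
  have h1 : (rid.take (k + i + 1)).length = k + i + 1 := by rw [List.length_take]; omega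
  have h2 : (rid.take (k + j + 1)).length = k + j + 1 := by rw [List.length_take]; omega
  rw [h] at h1; omega
theorem goScan_main (l : List (List Int)) (prev : List Int)
    (hs : l.Pairwise (· ≤ ·)) (hp : ∀ x ∈ l, prev ≤ x) :
    (goScan prev l).Pairwise (· < ·) ∧
      ∀ p, (p ∈ goScan prev l ↔ p ≠ [] ∧ ¬ p <+: prev ∧ ∃ rid ∈ l, p <+: rid) := by
  induction l generalizing prev with
  | nil => simp [goScan]
  | cons rid rest ih =>
    have hprev : prev ≤ rid := hp rid (List.mem_cons_self)
    have hrest : ∀ x ∈ rest, rid ≤ x := fun x hx => (List.pairwise_cons.mp hs).1 x hx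
    obtain ⟨ihp, ihm⟩ := ih rid (List.pairwise_cons.mp hs).2 hrest
    set k := pyLcp rid prev with hk
    have hmem : ∀ p, p ∈ goScan prev (rid :: rest) ↔
        p ≠ [] ∧ ¬ p <+: prev ∧ ∃ r ∈ rid :: rest, p <+: r := by
      intro p
      simp only [goScan, List.mem_append, mem_emitP, ihm]
      constructor
      · rintro (⟨hpre, hlen⟩ | ⟨hne, hnr, r, hr, hpr⟩)
        · refine ⟨?_, ?_, rid, List.mem_cons_self, hpre⟩
          · intro h; rw [h] at hlen; simp at hlen
          · intro hpp
            have := lcp_le hpre hpp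
            omega
        · refine ⟨hne, ?_, r, List.mem_cons_of_mem _ hr, hpr⟩
          intro hpp
          exact hnr (prefix_middle hprev (hrest r hr) hpp hpr)
      · rintro ⟨hne, hnp, r, hr, hpr⟩
        by_cases hrid : p <+: rid
        · left
          refine ⟨hrid, ?_⟩
          by_contra hlen
          exact hnp (lcp_ge hrid (by omega))
        · right
          rcases List.mem_cons.mp hr with rfl | hr'
          · exact absurd hpr hrid
          · exact ⟨hne, hrid, r, hr', hpr⟩
    refine ⟨?_, hmem⟩
    rw [goScan, List.pairwise_append]
    refine ⟨pairwise_emitP rid k, ihp, ?_⟩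
    intro p hpe q hqg
    obtain ⟨hpre, _⟩ := mem_emitP.mp hpe
    obtain ⟨hqne, hqnr, r, hr, hqr⟩ := ihm q |>.mp hqg
    exact cross_lt hpre (hrest r hr) hqr hqnr
theorem sortedI (xs : List (List Int)) :
    @PySem.List.sorted (List Int) (List Int) List.instLT (fun a b => a.decidableLT b) xs (fun x => x) false
    = @PySem.List.sorted (List Int) (List Int) LinearOrder.toPartialOrder.toLT LinearOrder.toDecidableLT xs (fun x => x) false := by
  congr 1
theorem final (ids : List (List Int)) :
    PySem.List.sorted (PySem.Set.ofList (allPref ids)) (fun x => x) false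
      = goScan [] (PySem.List.sorted ids (fun x => x) false) := by
  set ys := PySem.List.sorted ids (fun x => x) false with hys
  have hpair : ys.Pairwise (fun a b => a ≤ b) := by
    rw [hys, sortedI]; exact PySem.List.sorted_pairwise ids (fun x => x)
  have hperm : ys.Perm ids := PySem.List.sorted_perm ids (fun x => x) false
  obtain ⟨hlt, hmem⟩ := goScan_main ys [] hpair (fun x _ => nil_le_list x)
  have key := PySem.List.sorted_eq_of_perm_of_pairwise_lt (PySem.Set.ofList (allPref ids)) (goScan [] ys) (fun x : List Int => x)
  refine (sortedI _).trans (key ?_ ?_)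
  · rw [List.perm_ext_iff_of_nodup (hlt.imp (fun h => ne_of_lt h)) (PySem.Set.nodup_ofList _)]
    intro p
    rw [hmem p, PySem.Set.mem_ofList]
    simp only [allPref, List.mem_flatMap, mem_prefsOf, List.prefix_nil]
    constructor
    · rintro ⟨hne, _, r, hr, hpr⟩
      exact ⟨r, hperm.mem_iff.mp hr, hne, hpr⟩
    · rintro ⟨r, hr, hne, hpr⟩
      exact ⟨hne, hne, r, hperm.mem_iff.mpr hr, hpr⟩
  · exact hlt

-- ===== VERDICT (by name: the statement is the Claim_ definition above) =====
theorem leaf_regions_to_all_regions_spec : Claim_equal_leaf_regions_to_all_regions := by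
  intro ids _
  show leaf_regions_to_all_regions ids = leaf_regions_to_all_regions_alt ids
  unfold leaf_regions_to_all_regions leaf_regions_to_all_regions_alt
  rw [fold_B]
  simp only [List.nil_append]
  rw [fold_A]
  exact final ids
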